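-- pv_equiv track=rewrite | github.com/HUSKYdu/EE6227-homework3 | 3new.py | neg_defi
-- ===== SOURCE A (Python) =====
-- def neg_defi(a,all):
--     alllen = len(all)
--     defi = 0
--     for i in range(0,alllen):
--         if a!=all[i]:
--             for j in range(1,9):
--                 if a+9*j==all[i]:
--                     defi=defi+1
--                 if a-9*j==all[i]:
--                     defi=defi+1
--     return defi
-- ===== SOURCE B (Python) =====
-- def neg_defi(a, all):
--     return sum(1 for x in all if (x - a) % 9 == 0 and 9 <= abs(x - a) <= 72)
-- ===== Notes on version B (the rewrite author's own statement) =====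
-- stated objective: faster
-- what changed: Replaces the index loop with a nested j=1..8 scan by a single pass counting elements that pass a per-element arithmetic test ((x-a)%9==0 and 9<=|x-a|<=72), removing the inner loop.
import Mathlib
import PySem

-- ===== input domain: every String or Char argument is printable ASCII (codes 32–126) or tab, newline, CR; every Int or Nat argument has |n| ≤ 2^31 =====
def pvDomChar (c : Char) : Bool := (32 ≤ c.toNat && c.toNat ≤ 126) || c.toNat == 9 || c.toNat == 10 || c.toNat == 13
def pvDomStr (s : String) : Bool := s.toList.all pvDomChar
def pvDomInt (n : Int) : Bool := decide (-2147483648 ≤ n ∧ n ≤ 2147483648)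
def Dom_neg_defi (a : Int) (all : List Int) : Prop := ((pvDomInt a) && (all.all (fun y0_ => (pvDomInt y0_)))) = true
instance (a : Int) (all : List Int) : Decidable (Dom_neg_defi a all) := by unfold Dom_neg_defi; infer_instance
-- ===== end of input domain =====

-- B replaces the index loop with nested j=1..8 scan by one pass counting a per-element arithmetic test; return value only, same results.
-- ===== PORT A =====
def neg_defi (a : Int) (all : List Int) : Int :=
  (PySem.List.pyRange 0 (all.length : Int) 1).foldl
    (fun defi i =>
      if a ≠ PySem.List.pyGetD all i 0 then
        (PySem.List.pyRange 1 9 1).foldl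
          (fun defi j =>
            let defi := if a + 9 * j = PySem.List.pyGetD all i 0 then defi + 1 else defi
            if a - 9 * j = PySem.List.pyGetD all i 0 then defi + 1 else defi)
          defi
      else defi)
    0

-- ===== PORT B =====
def neg_defi_alt (a : Int) (all : List Int) : Int :=
  ((all.countP (fun x => decide ((x - a) % 9 = 0 ∧ 9 ≤ |x - a| ∧ |x - a| ≤ 72))) : Int)

-- ===== PRECONDITION & SPEC =====
def Spec_neg_defi (a : Int) (all : List Int) (out : Int) : Prop := out = neg_defi_alt a all
instance (a : Int) (all : List Int) (out : Int) : Decidable (Spec_neg_defi a all out) := by unfold Spec_neg_defi; infer_instance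

-- ===== CLAIM (what is proved, stated in full; the proofs are below) =====
def Claim_equal_neg_defi : Prop := ∀ (a : Int) (all : List Int), Dom_neg_defi a all → Spec_neg_defi a all (neg_defi a all)

-- ===== LEMMAS AND PROOFS =====

-- when x = a + 9k with 1 ≤ |k| ≤ 8, A's inner loop over j = 1..8 adds exactly 1
theorem inner_one (a k c : Int) (hk1 : -8 ≤ k) (hk2 : k ≤ 8) (hk3 : k ≠ 0) :
    ([1,2,3,4,5,6,7,8] : List Int).foldl
      (fun defi j =>
        let defi := if a + 9 * j = a + 9 * k then defi + 1 else defi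
        if a - 9 * j = a + 9 * k then defi + 1 else defi) c = c + 1 := by
  interval_cases k <;>
    first
      | exact absurd rfl hk3
      | simp [List.foldl_cons, List.foldl_nil, sub_eq_add_neg, add_right_inj]

-- when x is no a ± 9j, A's inner loop adds nothing
theorem inner_none (a x c : Int) (h : ∀ k : Int, 1 ≤ k → k ≤ 8 → a + 9 * k ≠ x ∧ a - 9 * k ≠ x) :
    ([1,2,3,4,5,6,7,8] : List Int).foldl
      (fun defi j =>
        let defi := if a + 9 * j = x then defi + 1 else defi
        if a - 9 * j = x then defi + 1 else defi) c = c := by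
  have hp1 : a + 9 ≠ x := by have := h 1 (by norm_num) (by norm_num); omega
  have hm1 : a - 9 ≠ x := by have := h 1 (by norm_num) (by norm_num); omega
  have hp2 : a + 18 ≠ x := by have := h 2 (by norm_num) (by norm_num); omega
  have hm2 : a - 18 ≠ x := by have := h 2 (by norm_num) (by norm_num); omega
  have hp3 : a + 27 ≠ x := by have := h 3 (by norm_num) (by norm_num); omega
  have hm3 : a - 27 ≠ x := by have := h 3 (by norm_num) (by norm_num); omega
  have hp4 : a + 36 ≠ x := by have := h 4 (by norm_num) (by norm_num); omega
  have hm4 : a - 36 ≠ x := by have := h 4 (by norm_num) (by norm_num); omega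
  have hp5 : a + 45 ≠ x := by have := h 5 (by norm_num) (by norm_num); omega
  have hm5 : a - 45 ≠ x := by have := h 5 (by norm_num) (by norm_num); omega
  have hp6 : a + 54 ≠ x := by have := h 6 (by norm_num) (by norm_num); omega
  have hm6 : a - 54 ≠ x := by have := h 6 (by norm_num) (by norm_num); omega
  have hp7 : a + 63 ≠ x := by have := h 7 (by norm_num) (by norm_num); omega
  have hm7 : a - 63 ≠ x := by have := h 7 (by norm_num) (by norm_num); omega
  have hp8 : a + 72 ≠ x := by have := h 8 (by norm_num) (by norm_num); omega
  have hm8 : a - 72 ≠ x := by have := h 8 (by norm_num) (by norm_num); omega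
  simp [List.foldl_cons, List.foldl_nil, hp1, hm1, hp2, hm2, hp3, hm3, hp4, hm4, hp5, hm5, hp6, hm6, hp7, hm7, hp8, hm8]

-- the inner j-loop adds 1 exactly when (x-a) is a nonzero multiple of 9 within ±72
theorem inner_loop_eq (a x c : Int) :
    (PySem.List.pyRange 1 9 1).foldl
      (fun defi j =>
        let defi := if a + 9 * j = x then defi + 1 else defi
        if a - 9 * j = x then defi + 1 else defi) c
    = c + (if (x - a) % 9 = 0 ∧ 9 ≤ |x - a| ∧ |x - a| ≤ 72 then 1 else 0) := by
  have hr : PySem.List.pyRange 1 9 1 = [1,2,3,4,5,6,7,8] := by decide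
  rw [hr]
  split_ifs with h
  · obtain ⟨h1, h2, h3⟩ := h
    have h2' := le_abs.mp h2
    have h3' := abs_le.mp h3
    have hx : x = a + 9 * ((x - a) / 9) := by omega
    rw [hx]
    exact inner_one a ((x - a) / 9) c (by omega) (by omega) (by omega)
  · rw [add_zero]
    refine inner_none a x c ?_
    intro k hk1 hk2
    constructor <;> intro he <;> apply h <;>
      exact ⟨by omega, le_abs.mpr (by omega), abs_le.mpr (by omega)⟩

-- A's per-element step equals "count x iff the arithmetic test holds"
theorem step_eq (a x defi : Int) :
    (if a ≠ x then
        (PySem.List.pyRange 1 9 1).foldl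
          (fun defi j =>
            let defi := if a + 9 * j = x then defi + 1 else defi
            if a - 9 * j = x then defi + 1 else defi) defi
      else defi)
    = if (x - a) % 9 = 0 ∧ 9 ≤ |x - a| ∧ |x - a| ≤ 72 then defi + 1 else defi := by
  by_cases hax : a = x
  · subst hax
    simp
  · rw [if_pos hax, inner_loop_eq]
    split_ifs <;> omega

-- ===== VERDICT (by name: the statement is the Claim_ definition above) =====
theorem neg_defi_spec : Claim_equal_neg_defi := by
  intro a all _
  unfold Spec_neg_defi neg_defi neg_defi_alt
  rw [PySem.List.foldl_pyRange_zero_pyGetD' all 0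
    (fun defi x =>
      if a ≠ x then
        (PySem.List.pyRange 1 9 1).foldl
          (fun defi j =>
            let defi := if a + 9 * j = x then defi + 1 else defi
            if a - 9 * j = x then defi + 1 else defi) defi
      else defi) 0]
  rw [PySem.List.foldl_congr_mem all _
      (fun defi x =>
        if (x - a) % 9 = 0 ∧ 9 ≤ |x - a| ∧ |x - a| ≤ 72 then defi + 1 else defi)
      0 (fun acc x _ => step_eq a x acc)]
  rw [PySem.List.foldl_ite_add_one]
  omega
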